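-- pv_equiv track=rewrite | github.com/bbchallenge/bbchallenge-api | bbchallenge_backend/utils.py | get_machine_code
-- ===== SOURCE A (Python) =====
-- def get_machine_code(machine_bytes):
--     to_ret = ""
--     for i, b in enumerate(machine_bytes):
--         if i % 3 == 0:
--             if machine_bytes[i + 2] == 0:
--                 to_ret += "-"
--                 continue
--             if b == 0:
--                 to_ret += "0"
--             else:
--                 to_ret += "1"
--         elif i % 3 == 1:
--             if machine_bytes[i + 1] == 0:
--                 to_ret += "-"
--                 continue
--             if b == 0:
--                 to_ret += "R"
--             else:
--                 to_ret += "L"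
--         else:
--             if b == 0:
--                 to_ret += "-"
--             else:
--                 to_ret += chr(ord("A") + b - 1)
--
--         if i % 6 == 5 and i != len(machine_bytes) - 1:
--             to_ret += "_"
--     return to_ret
-- ===== SOURCE B (Python) =====
-- def get_machine_code(machine_bytes):
--     transitions = []
--     for i in range(0, len(machine_bytes), 3):
--         w, m, s = machine_bytes[i], machine_bytes[i + 1], machine_bytes[i + 2]
--         if s == 0:
--             transitions.append("---")
--         else:
--             transitions.append(("0" if w == 0 else "1")
--                                + ("R" if m == 0 else "L")
--                                + chr(ord("A") + s - 1))
--     return "_".join(transitions[j] + (transitions[j + 1] if j + 1 < len(transitions) else "")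
--                     for j in range(0, len(transitions), 2))
-- ===== Notes on version B (the rewrite author's own statement) =====
-- stated objective: simpler
-- what changed: B walks the machine in whole 3-byte transitions (decoding each triple to its 3-char code at once) and joins pairs of transition codes with '_', instead of A's byte-by-byte loop that re-derives its position with i%3/i%6 tests and per-byte lookahead indexing.
import Mathlib
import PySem

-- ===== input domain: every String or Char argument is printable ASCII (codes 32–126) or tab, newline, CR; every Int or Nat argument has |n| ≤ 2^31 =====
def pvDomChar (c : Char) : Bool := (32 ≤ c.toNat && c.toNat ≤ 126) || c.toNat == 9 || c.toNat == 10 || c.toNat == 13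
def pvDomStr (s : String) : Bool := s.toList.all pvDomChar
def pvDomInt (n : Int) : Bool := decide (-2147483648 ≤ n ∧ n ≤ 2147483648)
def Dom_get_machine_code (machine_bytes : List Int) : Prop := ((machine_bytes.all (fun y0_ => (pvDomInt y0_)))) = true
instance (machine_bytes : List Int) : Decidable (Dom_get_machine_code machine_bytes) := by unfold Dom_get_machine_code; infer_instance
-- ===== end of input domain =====

-- B decodes the machine in whole 3-byte transitions and joins pairs of transition codes with '_',
-- instead of A's byte-by-byte loop with i%3/i%6 position tests (objective: simpler decomposition).

-- ===== PORT A =====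
-- chr(n): exact for 0 ≤ n ≤ 0x10FFFF outside the surrogate range; Pre_ excludes the rest
-- (chr raises ValueError outside [0, 0x10FFFF]; a lone surrogate is not a Lean Char).
def pyChr (n : Int) : String := String.ofList [Char.ofNat n.toNat]

-- one iteration of A's for-loop over enumerate(machine_bytes); the `getD 0` default is only
-- reached where Python raises IndexError (excluded by Pre_)
def stepA (mb : List Int) (acc : String) (ib : Int × Int) : String :=
  let i := ib.1
  let b := ib.2
  if PySem.Int.mod i 3 = 0 then
    if (PySem.List.pyGet? mb (i + 2)).getD 0 = 0 then acc ++ "-"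
    else
      let acc2 := if b = 0 then acc ++ "0" else acc ++ "1"
      if PySem.Int.mod i 6 = 5 ∧ i ≠ (mb.length : Int) - 1 then acc2 ++ "_" else acc2
  else if PySem.Int.mod i 3 = 1 then
    if (PySem.List.pyGet? mb (i + 1)).getD 0 = 0 then acc ++ "-"
    else
      let acc2 := if b = 0 then acc ++ "R" else acc ++ "L"
      if PySem.Int.mod i 6 = 5 ∧ i ≠ (mb.length : Int) - 1 then acc2 ++ "_" else acc2
  else
    let acc2 := if b = 0 then acc ++ "-" else acc ++ pyChr (65 + b - 1)
    if PySem.Int.mod i 6 = 5 ∧ i ≠ (mb.length : Int) - 1 then acc2 ++ "_" else acc2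

def get_machine_code (machine_bytes : List Int) : String :=
  (PySem.List.enumerate machine_bytes 0).foldl (stepA machine_bytes) ""

-- ===== PORT B =====
def encTriple (w m s : Int) : String :=
  if s = 0 then "---"
  else (if w = 0 then "0" else "1") ++ (if m = 0 then "R" else "L") ++ pyChr (65 + s - 1)

def tripleCodes : List Int → List String
  | w :: m :: s :: rest => encTriple w m s :: tripleCodes rest
  | _ => []

def joinPairs : List String → String
  | [] => ""
  | [t] => t
  | t :: u :: rest => t ++ u ++ (if rest = [] then "" else "_" ++ joinPairs rest)

def get_machine_code_alt (machine_bytes : List Int) : String :=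
  joinPairs (tripleCodes machine_bytes)

-- ===== PRECONDITION & SPEC =====
-- Pre_ excludes lists whose length is not a multiple of 3 (A raises IndexError on the lookahead
-- machine_bytes[i+1]/[i+2]) and triples whose nonzero state byte s makes chr(ord('A')+s-1) raise
-- ValueError or yield a Unicode surrogate (which a Lean Char cannot represent).
def Pre_get_machine_code (machine_bytes : List Int) : Prop :=
  goodTriples machine_bytes
where goodTriples : List Int → Prop
  | [] => True
  | _ :: _ :: s :: rest =>
      (s = 0 ∨ (0 ≤ s + 64 ∧ s + 64 ≤ 1114111 ∧ (s + 64 < 55296 ∨ 57343 < s + 64))) ∧ goodTriples rest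
  | _ => False

instance instDecGoodTriples (xs : List Int) : Decidable (Pre_get_machine_code.goodTriples xs) :=
  match xs with
  | [] => by unfold Pre_get_machine_code.goodTriples; infer_instance
  | [_] => by unfold Pre_get_machine_code.goodTriples; infer_instance
  | [_, _] => by unfold Pre_get_machine_code.goodTriples; infer_instance
  | _ :: _ :: _ :: rest =>
      have := instDecGoodTriples rest
      by unfold Pre_get_machine_code.goodTriples; infer_instance

instance (machine_bytes : List Int) : Decidable (Pre_get_machine_code machine_bytes) := by
  unfold Pre_get_machine_code; infer_instance

def pvWitness_get_machine_code : List Int := [1, 0, 2, 0, 1, 0, 1, 1, 3, 0, 0, 1]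

def Spec_get_machine_code (machine_bytes : List Int) (out : String) : Prop := out = get_machine_code_alt machine_bytes
instance (machine_bytes : List Int) (out : String) : Decidable (Spec_get_machine_code machine_bytes out) := by unfold Spec_get_machine_code; infer_instance

-- ===== CLAIM (what is proved, stated in full; the proofs are below) =====
def Claim_equal_get_machine_code : Prop := ∀ (machine_bytes : List Int), Dom_get_machine_code machine_bytes → Pre_get_machine_code machine_bytes → Spec_get_machine_code machine_bytes (get_machine_code machine_bytes)

-- ===== LEMMAS AND PROOFS =====

-- proof-side normal form of the output: transition codes joined with '_' after every
-- odd-indexed transition except the last; p = "current transition has odd index"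
def codeAux : Bool → List String → String
  | _, [] => ""
  | _, [t] => t
  | p, t :: u :: rest => t ++ ((if p then "_" else "") ++ codeAux (!p) (u :: rest))

theorem joinPairs_eq_codeAux : ∀ ts, joinPairs ts = codeAux false ts := by
  intro ts
  induction ts using joinPairs.induct with
  | case1 => rfl
  | case2 t => rfl
  | case3 t u rest ih =>
      cases rest with
      | nil => simp [joinPairs, codeAux]
      | cons v rest' =>
          simp only [joinPairs, codeAux, ih]
          simp [String.append_assoc]

theorem keyA : ∀ (R P : List Int) (acc : String),
    Pre_get_machine_code.goodTriples R → P.length % 3 = 0 →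
    List.foldl (stepA (P ++ R)) acc (PySem.List.enumerate R (P.length : Int))
      = acc ++ codeAux (decide (P.length % 6 = 3)) (tripleCodes R) := by
  intro R
  induction R using tripleCodes.induct with
  | case1 a b c rest ih =>
      intro P acc good hP
      obtain ⟨hs, good'⟩ := good
      rw [PySem.List.enumerate_cons, PySem.List.enumerate_cons, PySem.List.enumerate_cons]
      simp only [List.foldl_cons]
      rw [show (P.length : Int) + 1 + 1 + 1 = (P.length : Int) + 3 from by ring,
          show (P.length : Int) + 1 + 1 = (P.length : Int) + 2 from by ring]
      have hlook : PySem.List.pyGet? (P ++ (a :: b :: c :: rest)) ((P.length : Int) + 2)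
          = some c := by
        have h2 : ((P.length : Int) + 2) = ((P.length + 2 : Nat) : Int) := by push_cast; ring
        rw [h2, PySem.List.pyGet?_natCast, List.getElem?_append_right (by omega)]
        simp [show P.length + 2 - P.length = 2 from by omega]
      have hstep : stepA (P ++ (a :: b :: c :: rest))
            (stepA (P ++ (a :: b :: c :: rest))
              (stepA (P ++ (a :: b :: c :: rest)) acc ((P.length : Int), a))
              ((P.length : Int) + 1, b))
            ((P.length : Int) + 2, c)
          = acc ++ encTriple a b c ++ (if P.length % 6 = 3 ∧ 0 < rest.length then "_" else "") := by
        have hlook' : PySem.List.pyGet? (P ++ (a :: b :: c :: rest)) ((P.length : Int) + 1 + 1)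
            = some c := by
          rw [show (P.length : Int) + 1 + 1 = (P.length : Int) + 2 from by ring]; exact hlook
        have s1 : stepA (P ++ (a :: b :: c :: rest)) acc ((P.length : Int), a)
            = (if c = 0 then acc ++ "-" else if a = 0 then acc ++ "0" else acc ++ "1") := by
          simp only [stepA, hlook, Option.getD_some,
            PySem.Int.mod_eq_emod_of_pos (show (0:Int) < 3 by norm_num),
            PySem.Int.mod_eq_emod_of_pos (show (0:Int) < 6 by norm_num)]
          split_ifs <;> first | rfl | (exfalso; omega)
        have s2 : ∀ acc2 : String, stepA (P ++ (a :: b :: c :: rest)) acc2 ((P.length : Int) + 1, b)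
            = (if c = 0 then acc2 ++ "-" else if b = 0 then acc2 ++ "R" else acc2 ++ "L") := by
          intro acc2
          simp only [stepA, hlook', Option.getD_some,
            PySem.Int.mod_eq_emod_of_pos (show (0:Int) < 3 by norm_num),
            PySem.Int.mod_eq_emod_of_pos (show (0:Int) < 6 by norm_num)]
          split_ifs <;> first | rfl | (exfalso; omega)
        have s3 : ∀ acc2 : String, stepA (P ++ (a :: b :: c :: rest)) acc2 ((P.length : Int) + 2, c)
            = (if c = 0 then acc2 ++ "-" else acc2 ++ pyChr (65 + c - 1))
              ++ (if P.length % 6 = 3 ∧ 0 < rest.length then "_" else "") := by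
          intro acc2
          simp only [stepA,
            PySem.Int.mod_eq_emod_of_pos (show (0:Int) < 3 by norm_num),
            PySem.Int.mod_eq_emod_of_pos (show (0:Int) < 6 by norm_num),
            List.length_append, List.length_cons]
          push_cast
          rw [if_neg (by omega : ¬((P.length : Int) + 2) % 3 = 0),
              if_neg (by omega : ¬((P.length : Int) + 2) % 3 = 1)]
          split_ifs <;> first | rfl | (exfalso; omega) | simp
        rw [s3, s2, s1]
        simp only [encTriple]
        split_ifs <;> (simp only [String.append_assoc]; try rfl)
      rw [hstep]
      have hL : P ++ (a :: b :: c :: rest) = (P ++ [a, b, c]) ++ rest := by simp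
      have hj3 : (P.length : Int) + 3 = (((P ++ [a, b, c]).length : Nat) : Int) := by
        simp
      rw [hL, hj3, ih (P ++ [a, b, c]) _ good' (by simp; omega)]
      have hflip : decide ((P ++ [a, b, c]).length % 6 = 3) = !(decide (P.length % 6 = 3)) := by
        rw [← decide_not, decide_eq_decide]
        simp only [List.length_append, List.length_cons, List.length_nil]
        omega
      rw [hflip]
      rcases rest with _ | ⟨r1, rest1⟩
      · simp [tripleCodes, codeAux]
      · rcases rest1 with _ | ⟨r2, rest2⟩
        · exact absurd good' (by simp [Pre_get_machine_code.goodTriples])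
        rcases rest2 with _ | ⟨r3, rest3⟩
        · exact absurd good' (by simp [Pre_get_machine_code.goodTriples])
        by_cases h : P.length % 6 = 3 <;>
          simp [tripleCodes, codeAux, h, String.append_assoc]
  | case2 x h =>
      intro P acc good _hP
      match x, h with
      | [], _ => simp [PySem.List.enumerate_nil, tripleCodes, codeAux]
      | [_], _ => exact absurd good (by simp [Pre_get_machine_code.goodTriples])
      | [_, _], _ => exact absurd good (by simp [Pre_get_machine_code.goodTriples])
      | a :: b :: c :: rest, h => exact absurd rfl (fun hh => h a b c rest hh)

theorem get_machine_code_spec : Claim_equal_get_machine_code := by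
  intro mb _hdom hpre
  unfold Spec_get_machine_code get_machine_code get_machine_code_alt
  have h := keyA mb [] "" hpre (by simp)
  simp only [List.nil_append, List.length_nil, Nat.cast_zero] at h
  rw [h, joinPairs_eq_codeAux]
  simp
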